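-- pv_equiv track=rewrite | github.com/dementive/ImperatorTools | src/game_objects.py | write_syntax
-- ===== SOURCE A (Python) =====
-- from typing import Dict, List
--
-- def write_syntax(li: List[str], header: str, scope: str):
--     string = ""
--     count = 0
--     string += f"\n    # Generated {header}\n    - match: \\b("
--     for i in li:
--         count += 1
--         # Count is needed to split because columns are waaay too long for syntax regex
--         if count == 0:
--             string = f")\\b\n      scope: {scope}\n"
--             string += f"    # Generated {header}\n    - match: \\b({i}|"
--         elif count == 75:
--             string += f")\\b\n      scope: {scope}\n"
--             string += f"    # Generated {header}\n    - match: \\b({i}|"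
--             count = 1
--         else:
--             string += f"{i}|"
--     string += f")\\b\n      scope: {scope}"
--     return string
-- ===== SOURCE B (Python) =====
-- from typing import Dict, List
--
-- def write_syntax(li: List[str], header: str, scope: str):
--     chunks = [li[i:i + 74] for i in range(0, len(li), 74)] or [[]]
--     blocks = [
--         f"# Generated {header}\n    - match: \\b("
--         + "".join(f"{x}|" for x in chunk)
--         + f")\\b\n      scope: {scope}"
--         for chunk in chunks
--     ]
--     return "\n    " + "\n    ".join(blocks)
-- ===== Notes on version B (the rewrite author's own statement) =====
-- stated objective: simpler
-- what changed: Replaced the stateful counter-with-branches accumulation loop by partitioning the list into 74-item chunks, mapping each chunk to its block string, and joining the blocks.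
import Mathlib
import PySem

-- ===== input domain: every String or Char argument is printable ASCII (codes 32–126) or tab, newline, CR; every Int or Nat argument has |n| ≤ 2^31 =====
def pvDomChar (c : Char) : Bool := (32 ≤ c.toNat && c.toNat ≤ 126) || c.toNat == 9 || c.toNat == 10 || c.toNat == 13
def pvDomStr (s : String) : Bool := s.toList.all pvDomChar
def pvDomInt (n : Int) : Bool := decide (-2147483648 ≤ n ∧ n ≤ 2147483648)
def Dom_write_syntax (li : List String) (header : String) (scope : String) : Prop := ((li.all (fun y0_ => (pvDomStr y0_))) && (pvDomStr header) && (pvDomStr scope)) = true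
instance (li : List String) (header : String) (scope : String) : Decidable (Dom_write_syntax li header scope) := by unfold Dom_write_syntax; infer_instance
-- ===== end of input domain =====

-- B replaces A's stateful counter-with-branches loop by a partition-into-74-chunks,
-- map-to-block, join decomposition (objective: simpler).

-- ===== PORT A =====
-- literal port of A's loop: state (string, count); A's unreachable count == 0 branch is kept
def write_syntax (li : List String) (header : String) (scope : String) : String :=
  let st := li.foldl (fun (acc : String × Int) i =>
    let string := acc.1
    let count := acc.2 + 1
    if count == 0 then
      ((")\\b\n      scope: " ++ scope ++ "\n") ++
        ("    # Generated " ++ header ++ "\n    - match: \\b(" ++ i ++ "|"), count)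
    else if count == 75 then
      (string ++ ((")\\b\n      scope: " ++ scope ++ "\n") ++
        ("    # Generated " ++ header ++ "\n    - match: \\b(" ++ i ++ "|")), 1)
    else
      (string ++ (i ++ "|"), count))
    ("" ++ ("\n    # Generated " ++ header ++ "\n    - match: \\b("), 0)
  st.1 ++ (")\\b\n      scope: " ++ scope)

-- ===== PORT B =====
-- port of the chunk comprehension [li[i:i+74] for i in range(0, len(li), 74)]
def pvChunks74 (xs : List String) : List (List String) :=
  if h : xs = [] then [] else xs.take 74 :: pvChunks74 (xs.drop 74)
termination_by xs.length
decreasing_by cases xs with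
  | nil => exact absurd rfl h
  | cons a t => simp

-- hand port of Python's str.join(sep, l)
def pvJoin (sep : String) : List String → String
  | [] => ""
  | [a] => a
  | a :: b :: t => a ++ sep ++ pvJoin sep (b :: t)

def write_syntax_alt (li : List String) (header : String) (scope : String) : String :=
  let chunks := if li = [] then [([] : List String)] else pvChunks74 li
  let blocks := chunks.map (fun chunk =>
    ("# Generated " ++ header ++ "\n    - match: \\b(")
      ++ pvJoin "" (chunk.map (fun x => x ++ "|"))
      ++ (")\\b\n      scope: " ++ scope))
  "\n    " ++ pvJoin "\n    " blocks

-- ===== PRECONDITION & SPEC =====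
def Spec_write_syntax (li : List String) (header : String) (scope : String) (out : String) : Prop := out = write_syntax_alt li header scope
instance (li : List String) (header : String) (scope : String) (out : String) : Decidable (Spec_write_syntax li header scope out) := by unfold Spec_write_syntax; infer_instance

-- ===== CLAIM (what is proved, stated in full; the proofs are below) =====
def Claim_equal_write_syntax : Prop := ∀ (li : List String) (header : String) (scope : String), Dom_write_syntax li header scope → Spec_write_syntax li header scope (write_syntax li header scope)

-- ===== LEMMAS AND PROOFS =====

-- named pieces of the boilerplate
def pvHdr (header : String) : String := "# Generated " ++ header ++ "\n    - match: \\b("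
def pvTl (scope : String) : String := ")\\b\n      scope: " ++ scope
def pvMid (header scope : String) : String :=
  (")\\b\n      scope: " ++ scope ++ "\n") ++ ("    # Generated " ++ header ++ "\n    - match: \\b(")
def pvInner (xs : List String) : String := pvJoin "" (xs.map (fun x => x ++ "|"))

-- the body A's loop produces, as a structural recursion on the list with the counter
def pvGoA (header scope : String) : List String → Nat → String
  | [], _ => ""
  | x :: xs, c =>
    if c + 1 = 75 then pvMid header scope ++ (x ++ "|") ++ pvGoA header scope xs 1
    else (x ++ "|") ++ pvGoA header scope xs (c + 1)

theorem pvJoin_cons (sep a : String) (l : List String) (h : l ≠ []) :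
    pvJoin sep (a :: l) = a ++ sep ++ pvJoin sep l := by
  cases l with
  | nil => exact absurd rfl h
  | cons b t => rfl

theorem pvInner_cons (x : String) (l : List String) :
    pvInner (x :: l) = (x ++ "|") ++ pvInner l := by
  cases l with
  | nil => simp [pvInner, pvJoin]
  | cons b t => simp [pvInner, pvJoin, String.append_assoc]

-- A's fold equals pvGoA
theorem pvFoldA (header scope : String) (xs : List String) (s : String) (c : Nat) :
    (xs.foldl (fun (acc : String × Int) i =>
      let string := acc.1
      let count := acc.2 + 1
      if count == 0 then
        ((")\\b\n      scope: " ++ scope ++ "\n") ++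
          ("    # Generated " ++ header ++ "\n    - match: \\b(" ++ i ++ "|"), count)
      else if count == 75 then
        (string ++ ((")\\b\n      scope: " ++ scope ++ "\n") ++
          ("    # Generated " ++ header ++ "\n    - match: \\b(" ++ i ++ "|")), 1)
      else
        (string ++ (i ++ "|"), count)) (s, (c : Int))).1
    = s ++ pvGoA header scope xs c := by
  induction xs generalizing s c with
  | nil => simp [pvGoA]
  | cons x rest ih =>
    rw [List.foldl_cons]
    by_cases h75 : c + 1 = 75
    · have : ((c : Int) + 1 == 0) = false := by simp; omega
      have h75' : ((c : Int) + 1 == 75) = true := by simp; omega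
      simp only [this, h75', Bool.false_eq_true, if_false, if_true]
      have := ih (s ++ ((")\\b\n      scope: " ++ scope ++ "\n") ++
          ("    # Generated " ++ header ++ "\n    - match: \\b(" ++ x ++ "|"))) 1
      simp only [Nat.cast_one] at this
      rw [this, pvGoA, if_pos h75]
      simp [pvMid, String.append_assoc]
    · have h0 : ((c : Int) + 1 == 0) = false := by simp; omega
      have h75' : ((c : Int) + 1 == 75) = false := by simp; omega
      simp only [h0, h75', Bool.false_eq_true, if_false]
      have hcast : (c : Int) + 1 = ((c + 1 : Nat) : Int) := by push_cast; ring
      rw [hcast, ih (s ++ (x ++ "|")) (c + 1), pvGoA, if_neg h75]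
      simp [String.append_assoc]

theorem pvGoA_small (header scope : String) (xs : List String) (c : Nat)
    (h : xs.length + c ≤ 74) : pvGoA header scope xs c = pvInner xs := by
  induction xs generalizing c with
  | nil => simp [pvGoA, pvInner, pvJoin]
  | cons x rest ih =>
    have h75 : ¬ (c + 1 = 75) := by simp at h ⊢; omega
    rw [pvGoA, if_neg h75, ih (c + 1) (by simp at h ⊢; omega), pvInner_cons]

theorem pvGoA_split (header scope : String) (xs : List String) (c : Nat)
    (hc : c ≤ 74) (h : 74 - c < xs.length) :
    pvGoA header scope xs c
      = pvInner (xs.take (74 - c)) ++ pvMid header scope ++ pvGoA header scope (xs.drop (74 - c)) 0 := by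
  induction xs generalizing c with
  | nil => simp at h
  | cons x rest ih =>
    by_cases hc74 : c = 74
    · subst hc74
      simp only [Nat.sub_self, List.take_zero, List.drop_zero]
      rw [pvGoA, if_pos rfl, pvGoA, if_neg (by omega)]
      simp [pvInner, pvJoin, String.append_assoc]
    · have hlt : c < 74 := lt_of_le_of_ne hc hc74
      have hk : 74 - c = (73 - c) + 1 := by omega
      rw [pvGoA, if_neg (by omega), hk, List.take_succ_cons, List.drop_succ_cons,
        pvInner_cons, ih (c + 1) (by omega) (by simp at h ⊢; omega)]
      have : 74 - (c + 1) = 73 - c := by omega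
      rw [this]
      simp [String.append_assoc]

theorem pvChunks74_ne_nil (xs : List String) (h : xs ≠ []) : pvChunks74 xs ≠ [] := by
  rw [pvChunks74]; simp [h]

-- literal gluing facts
theorem pvMid_eq (header scope : String) :
    pvMid header scope = pvTl scope ++ "\n    " ++ pvHdr header := by
  apply String.ext
  simp [pvMid, pvTl, pvHdr]

-- the B-side join equals hdr ++ body ++ tl
theorem pvBJ (header scope : String) (xs : List String) (h : xs ≠ []) :
    pvJoin "\n    " ((pvChunks74 xs).map (fun chunk =>
      ("# Generated " ++ header ++ "\n    - match: \\b(")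
        ++ pvJoin "" (chunk.map (fun x => x ++ "|"))
        ++ (")\\b\n      scope: " ++ scope)))
    = pvHdr header ++ pvGoA header scope xs 0 ++ pvTl scope := by
  induction xs using pvChunks74.induct with
  | case1 => exact absurd rfl h
  | case2 xs hne ih =>
    rw [pvChunks74, dif_neg hne, List.map_cons]
    by_cases hd : xs.drop 74 = []
    · have hlen : xs.length ≤ 74 := by
        rw [List.drop_eq_nil_iff] at hd; exact hd
      rw [hd, pvChunks74, dif_pos rfl, List.map_nil, pvJoin,
        List.take_of_length_le hlen,
        pvGoA_small header scope xs 0 (by omega)]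
      simp [pvHdr, pvTl, pvInner]
    · have hlen : 74 < xs.length := by
        by_contra hle
        exact hd (List.drop_eq_nil_iff.mpr (by omega))
      have hmapne : (pvChunks74 (xs.drop 74)).map (fun chunk =>
          ("# Generated " ++ header ++ "\n    - match: \\b(")
            ++ pvJoin "" (chunk.map (fun x => x ++ "|"))
            ++ (")\\b\n      scope: " ++ scope)) ≠ [] := by
        simp [pvChunks74_ne_nil (xs.drop 74) hd]
      rw [pvJoin_cons _ _ _ hmapne, ih hd,
        pvGoA_split header scope xs 0 (by omega) (by omega), pvMid_eq]
      simp only [Nat.sub_zero]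
      simp [pvHdr, pvTl, pvInner, String.append_assoc]

-- ===== VERDICT (by name: the statement is the Claim_ definition above) =====
theorem write_syntax_spec : Claim_equal_write_syntax := by
  intro li header scope _
  show write_syntax li header scope = write_syntax_alt li header scope
  by_cases hnil : li = []
  · subst hnil
    apply String.ext
    simp [write_syntax, write_syntax_alt, pvJoin]
  · have hfold := pvFoldA header scope li
      ("" ++ ("\n    # Generated " ++ header ++ "\n    - match: \\b(")) 0
    simp only [Nat.cast_zero] at hfold
    rw [write_syntax_alt]
    simp only [if_neg hnil]
    rw [write_syntax]
    simp only [hfold]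
    rw [pvBJ header scope li hnil]
    apply String.ext
    simp [pvHdr, pvTl, String.append_assoc]
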